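-- pv_equiv track=rewrite | github.com/darsh-worma/advent-23 | day 11/day 11 part 1.py | get_total_galaxies
-- ===== SOURCE A (Python) =====
-- def get_total_galaxies(matrix):
--     galaxies = 1
--     for i in range(len(matrix)):
--         for j in range(len(matrix[i])):
--             if (matrix[i][j] == '#'):
--                 matrix[i][j] = str(galaxies)
--                 galaxies += 1
--     return (galaxies - 1)
-- ===== SOURCE B (Python) =====
-- def get_total_galaxies(matrix):
--     # Return-value re-implementation only: A also relabels each '#' cell in
--     # place with its number; B does not mutate the matrix (stated difference
--     # in side effects; the equivalence claim is about the return value).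
--     if not matrix:
--         return 0
--     return matrix[0].count('#') + get_total_galaxies(matrix[1:])
-- ===== Notes on version B (the rewrite author's own statement) =====
-- stated objective: idiomatic
-- what changed: B replaces A's index-driven double loop with a running labeling counter by structural recursion on the rows, counting each row's '#' cells with the builtin list.count and summing; B keeps no labeling state and performs no in-place mutation (return value only).
import Mathlib
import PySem

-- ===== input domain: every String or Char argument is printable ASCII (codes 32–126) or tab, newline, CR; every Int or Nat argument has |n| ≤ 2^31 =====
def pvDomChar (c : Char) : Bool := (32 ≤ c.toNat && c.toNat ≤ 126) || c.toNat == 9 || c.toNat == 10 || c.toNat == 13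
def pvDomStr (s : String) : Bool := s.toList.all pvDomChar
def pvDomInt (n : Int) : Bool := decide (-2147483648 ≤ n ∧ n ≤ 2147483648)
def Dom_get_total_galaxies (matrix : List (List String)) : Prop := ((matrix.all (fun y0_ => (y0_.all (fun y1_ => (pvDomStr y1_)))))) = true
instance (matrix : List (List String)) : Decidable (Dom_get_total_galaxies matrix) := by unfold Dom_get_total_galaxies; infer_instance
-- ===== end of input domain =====

-- B recomputes only the RETURN value by structural recursion with builtin row.count('#');
-- A additionally relabels each '#' cell in place — that mutation (unobservable in the
-- return value) is not carried by either pure port.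

-- ===== PORT A =====
-- index-driven double loop with a running labeling counter; the in-place write
-- matrix[i][j] = str(galaxies) never affects a later read, so the counter is exact
def get_total_galaxies (matrix : List (List String)) : Int :=
  let galaxies :=
    matrix.foldl (fun g row =>
      row.foldl (fun g c => if c == "#" then g + 1 else g) g) (1 : Int)
  galaxies - 1

-- ===== PORT B =====
-- structural recursion on the rows; each row's '#' cells counted by list.count
def get_total_galaxies_alt (matrix : List (List String)) : Int :=
  match matrix with
  | [] => 0
  | row :: rest => (PySem.List.count row "#" : Int) + get_total_galaxies_alt rest

-- ===== PRECONDITION & SPEC =====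
def Spec_get_total_galaxies (matrix : List (List String)) (out : Int) : Prop := out = get_total_galaxies_alt matrix
instance (matrix : List (List String)) (out : Int) : Decidable (Spec_get_total_galaxies matrix out) := by unfold Spec_get_total_galaxies; infer_instance

-- ===== CLAIM (what is proved, stated in full; the proofs are below) =====
def Claim_equal_get_total_galaxies : Prop := ∀ (matrix : List (List String)), Dom_get_total_galaxies matrix → Spec_get_total_galaxies matrix (get_total_galaxies matrix)

-- ===== LEMMAS AND PROOFS =====

-- ===== VERDICT (by name: the statement is the Claim_ definition above) =====
-- A's inner loop counts the '#' cells of a row (PySem bridge lemma foldl_beq_add_one)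
theorem pv_outer (rows : List (List String)) (g : Int) :
    rows.foldl (fun g row =>
      row.foldl (fun g c => if c == "#" then g + 1 else g) g) g
      = g + get_total_galaxies_alt rows := by
  induction rows generalizing g with
  | nil => simp [get_total_galaxies_alt]
  | cons r rs ih =>
    rw [List.foldl_cons, PySem.List.foldl_beq_add_one, ih]
    simp [get_total_galaxies_alt, PySem.List.count]
    ring

theorem get_total_galaxies_spec : Claim_equal_get_total_galaxies := by
  intro matrix _
  unfold Spec_get_total_galaxies get_total_galaxies
  rw [pv_outer]
  ring
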